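-- pv_equiv track=rewrite | github.com/maiconc137/desafioPython | avançado/ex003.py | contaPalavras
-- ===== SOURCE A (Python) =====
-- def contaPalavras(texto: str) -> dict:
--     texto = texto.replace(",", "") # tiramos alguns caracteres
--     texto = texto.replace(".", "") # desnecessários do texto
--     texto = texto.replace("\n","")
--
--     palavras = texto.split(" ")
--     contagem = {}
--     for palavra in palavras:
--         if palavra in contagem.keys():
--             contagem[palavra] += 1
--         else:
--             contagem[palavra] = 1
--     # queremos apenas repetidas
--     contagem = {k:v for k,v in contagem.items() if v > 1}
--     return contagem
-- ===== SOURCE B (Python) =====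
-- def contaPalavras(texto: str) -> dict:
--     texto = texto.replace(",", "").replace(".", "").replace("\n", "")
--     palavras = texto.split(" ")
--     repetidas = {}
--     for palavra in palavras:
--         if palavra not in repetidas:
--             c = palavras.count(palavra)
--             if c > 1:
--                 repetidas[palavra] = c
--     return repetidas
-- ===== Notes on version B (the rewrite author's own statement) =====
-- stated objective: alternative
-- what changed: Instead of building a full word->count dict and then filtering it in a second dict-comprehension pass, B builds the result dict directly in one construction: for each not-yet-recorded word it computes its total frequency with list.count and records it only when it exceeds 1.
import Mathlib
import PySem

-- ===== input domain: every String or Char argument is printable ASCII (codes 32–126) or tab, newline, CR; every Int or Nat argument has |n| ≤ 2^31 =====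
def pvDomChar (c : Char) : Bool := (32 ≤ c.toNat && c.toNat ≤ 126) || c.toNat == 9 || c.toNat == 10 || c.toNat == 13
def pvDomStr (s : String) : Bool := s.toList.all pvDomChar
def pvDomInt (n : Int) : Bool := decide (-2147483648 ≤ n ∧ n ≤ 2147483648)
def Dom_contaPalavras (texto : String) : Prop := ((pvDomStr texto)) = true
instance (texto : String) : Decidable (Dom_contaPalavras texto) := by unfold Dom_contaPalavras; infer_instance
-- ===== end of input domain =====

-- B builds the repeated-words dict directly (one guarded construction using list.count) instead of
-- A's count-everything dict followed by a filtering dict comprehension; objective: alternative.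

-- ===== PORT A =====
def contaPalavras (texto : String) : List (String × Int) :=
  let t1 := PySem.Str.replace texto "," ""
  let t2 := PySem.Str.replace t1 "." ""
  let t3 := PySem.Str.replace t2 "\n" ""
  -- texto.split(" "): sep ≠ "" so split? is always some; .getD [] is never taken
  let palavras := (PySem.Str.split? t3 " ").getD []
  let contagem := palavras.foldl
    (fun d palavra =>
      if d.contains palavra then d.modify palavra 0 (· + 1) else d.insert palavra 1)
    PySem.Dict.empty
  -- {k:v for k,v in contagem.items() if v > 1}
  (contagem.items.foldl
    (fun d p => if p.2 > 1 then d.insert p.1 p.2 else d) PySem.Dict.empty).items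

-- ===== PORT B =====
def contaPalavras_alt (texto : String) : List (String × Int) :=
  let palavras := (PySem.Str.split? (PySem.Str.replace (PySem.Str.replace
      (PySem.Str.replace texto "," "") "." "") "\n" "") " ").getD []
  (palavras.foldl
    (fun d palavra =>
      if d.contains palavra then d
      else
        let c : Int := (PySem.List.count palavras palavra : Int)
        if c > 1 then d.insert palavra c else d)
    PySem.Dict.empty).items

-- ===== PRECONDITION & SPEC =====
def Spec_contaPalavras (texto : String) (out : List (String × Int)) : Prop := out = contaPalavras_alt texto
instance (texto : String) (out : List (String × Int)) : Decidable (Spec_contaPalavras texto out) := by unfold Spec_contaPalavras; infer_instance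

-- ===== CLAIM (what is proved, stated in full; the proofs are below) =====
def Claim_equal_contaPalavras : Prop := ∀ (texto : String), Dom_contaPalavras texto → Spec_contaPalavras texto (contaPalavras texto)

-- ===== LEMMAS AND PROOFS =====

-- A's counting loop body is exactly Counter's step (its else-branch inserts count 1, which is modify from default 0)
lemma pv_count_fun :
    (fun (d : PySem.Dict String Int) (palavra : String) =>
      if d.contains palavra then d.modify palavra 0 (· + 1) else d.insert palavra 1)
    = fun (d : PySem.Dict String Int) (palavra : String) => d.modify palavra 0 (· + 1) := by
  funext d w
  by_cases h : d.contains w = true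
  · simp [h]
  · simp only [Bool.not_eq_true] at h
    simp [h, PySem.Dict.modify, PySem.Dict.getD_of_not_contains d 0 h]

-- A's filtering dict comprehension over items with distinct fresh keys appends the filtered items
lemma pv_filter_fold : ∀ (ps : List (String × Int)) (d : PySem.Dict String Int),
    (ps.map (fun p => p.1)).Nodup → (∀ p ∈ ps, d.contains p.1 = false) →
    (ps.foldl (fun d p => if p.2 > 1 then d.insert p.1 p.2 else d) d).items
      = d.items ++ ps.filter (fun p => decide (p.2 > 1))
  | [], d, _, _ => by simp
  | p :: ps, d, hnd, hfresh => by
    simp only [List.map_cons, List.nodup_cons] at hnd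
    simp only [List.foldl_cons]
    by_cases hv : p.2 > 1
    · rw [if_pos hv]
      have hfc : d.contains p.1 = false := hfresh p (by simp)
      have h2 : ∀ q ∈ ps, (d.insert p.1 p.2).contains q.1 = false := by
        intro q hq
        rw [PySem.Dict.contains_insert]
        have hne : q.1 ≠ p.1 := fun he => hnd.1 (he ▸ List.mem_map_of_mem hq)
        simp [hne, hfresh q (List.mem_cons_of_mem _ hq)]
      rw [pv_filter_fold ps _ hnd.2 h2,
        PySem.Dict.items_insert_of_not_contains d p.2 hfc]
      simp [hv]
    · rw [if_neg hv, pv_filter_fold ps d hnd.2 (fun q hq => hfresh q (List.mem_cons_of_mem _ hq))]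
      simp [hv]

-- B's loop invariant: the dict holds exactly the already-seen words of total count > 1, in seen order
lemma pv_b_fold (c : String → Int) : ∀ (l S : List String) (d : PySem.Dict String Int),
    S.Nodup →
    d.items = (S.filter (fun w => decide (c w > 1))).map (fun w => (w, c w)) →
    (l.foldl (fun d w => if d.contains w then d else if c w > 1 then d.insert w (c w) else d) d).items
      = ((PySem.Set.update S l).filter (fun w => decide (c w > 1))).map (fun w => (w, c w))
  | [], S, d, _, hd => by simpa [PySem.Set.update] using hd
  | w :: l, S, d, hS, hd => by
    simp only [List.foldl_cons, PySem.Set.update_cons]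
    have hcont : d.contains w = (decide (w ∈ S) && decide (c w > 1)) := by
      rw [PySem.Dict.contains_eq_decide_mem_keys]
      simp only [PySem.Dict.keys, hd, List.map_map]
      by_cases hw : w ∈ S <;> by_cases hc : c w > 1 <;>
        simp [List.mem_map, List.mem_filter, hw, hc]
    by_cases hw : w ∈ S
    · have hadd : PySem.Set.add S w = S := by
        simp [PySem.Set.add, PySem.Set.contains, hw]
      by_cases hc : c w > 1
      · have ht : d.contains w = true := by rw [hcont]; simp [hw, hc]
        rw [if_pos ht, hadd]
        exact pv_b_fold c l S d hS hd
      · have hf : d.contains w = false := by rw [hcont]; simp [hc]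
        rw [if_neg (by simp [hf]), if_neg hc, hadd]
        exact pv_b_fold c l S d hS hd
    · have hf : d.contains w = false := by rw [hcont]; simp [hw]
      have hadd : PySem.Set.add S w = S ++ [w] := by
        simp [PySem.Set.add, PySem.Set.contains, hw]
      rw [if_neg (by simp [hf]), hadd]
      by_cases hc : c w > 1
      · rw [if_pos hc]
        refine pv_b_fold c l (S ++ [w]) _ ?_ ?_
        · simp only [List.nodup_append, List.nodup_singleton, true_and]
          refine ⟨hS, ?_⟩
          intro a ha b hb
          rw [List.mem_singleton] at hb
          subst hb
          exact fun he => hw (he ▸ ha)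
        · rw [PySem.Dict.items_insert_of_not_contains d (c w) hf, hd]
          simp [List.filter_append, hc]
      · rw [if_neg hc]
        refine pv_b_fold c l (S ++ [w]) d ?_ ?_
        · simp only [List.nodup_append, List.nodup_singleton, true_and]
          refine ⟨hS, ?_⟩
          intro a ha b hb
          rw [List.mem_singleton] at hb
          subst hb
          exact fun he => hw (he ▸ ha)
        · rw [hd]; simp [List.filter_append, hc]

-- ===== VERDICT (by name: the statement is the Claim_ definition above) =====
theorem contaPalavras_spec : Claim_equal_contaPalavras := by
  intro texto _
  unfold Spec_contaPalavras contaPalavras contaPalavras_alt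
  simp only []
  generalize ((PySem.Str.split? (PySem.Str.replace (PySem.Str.replace
      (PySem.Str.replace texto "," "") "." "") "\n" "") " ").getD []) = ws
  rw [pv_count_fun, ← PySem.Dict.counter_eq_foldl]
  have hnd : ((PySem.Dict.counter ws).items.map (fun p => p.1)).Nodup :=
    PySem.Dict.nodup_keys_counter ws
  have hB := pv_b_fold (fun w => ((PySem.List.count ws w : Nat) : Int)) ws [] PySem.Dict.empty
    List.nodup_nil (by simp [PySem.Dict.empty])
  rw [pv_filter_fold _ _ hnd (fun p _ => PySem.Dict.contains_empty p.1),
    PySem.Dict.items_counter, hB, PySem.Set.update_nil_left]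
  simp [List.filter_map, Function.comp_def, PySem.List.count_eq]
  simp [PySem.Dict.empty]
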